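-- pv_equiv track=rewrite | github.com/Caliber-X/Programming-for-the-Puzzled----Srini-Devadas | Puzzle 11/maxsum-EXERCISE1.py | coinsVariantIterative
-- ===== SOURCE A (Python) =====
-- def coinsVariantIterative(row):
--
--     table = {}
--     table[0] = 0
--     table[1] = row[-1]
--     table[2] = row[-1] + row[-2]
--     table[3] = max(table[1] + row[-3], table[2], row[-2] + row[-3])
--     for i in range(4, len(row) + 1):
--         resulti = max(table[i-4] + row[1-i] + row[-i],\
--                        table[i-2] + row[-i], table[i-1])
--         table[i] = resulti
--
--     return table[len(row)], table
-- ===== SOURCE B (Python) =====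
-- def coinsVariantIterative(row):
--     table = {}
--     table[0] = 0
--     table[1] = row[-1]
--     table[2] = row[-1] + row[-2]
--     table[3] = max(table[1] + row[-3], table[2], row[-2] + row[-3])
--
--     # top-down, demand-driven: descend with an explicit stack to the first
--     # uncomputed index, then fill on the way back up
--     stack = [len(row)]
--     while stack:
--         i = stack[-1]
--         if i in table:
--             stack.pop()
--         elif i - 1 in table:
--             table[i] = max(table[i - 4] + row[1 - i] + row[-i],
--                            table[i - 2] + row[-i], table[i - 1])
--             stack.pop()
--         else:
--             stack.append(i - 1)
--
--     return table[len(row)], table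
-- ===== Notes on version B (the rewrite author's own statement) =====
-- stated objective: alternative
-- what changed: A fills the table bottom-up with a for-loop over range(4, len(row)+1); B computes it top-down on demand: an explicit stack descends from len(row) to the first index not yet in the table and fills entries on the way back up (iterative memoization).
import Mathlib
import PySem

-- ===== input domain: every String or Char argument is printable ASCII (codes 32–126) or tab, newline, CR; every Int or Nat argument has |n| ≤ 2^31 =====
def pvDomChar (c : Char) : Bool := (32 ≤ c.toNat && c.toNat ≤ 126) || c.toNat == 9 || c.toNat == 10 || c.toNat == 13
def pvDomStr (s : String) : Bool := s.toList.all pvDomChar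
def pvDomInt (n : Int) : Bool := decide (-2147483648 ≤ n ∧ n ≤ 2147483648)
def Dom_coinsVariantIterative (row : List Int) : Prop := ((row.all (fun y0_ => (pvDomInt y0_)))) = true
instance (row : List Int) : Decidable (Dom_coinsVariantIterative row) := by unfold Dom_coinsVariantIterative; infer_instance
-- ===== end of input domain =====

-- B replaces A's bottom-up for-loop by top-down demand-driven filling with an explicit stack
-- (iterative memoization): an alternative decomposition, same cost.

-- ===== PORT A =====
-- literal transliteration of A: the dict is built key by key, the loop is a foldl over range(4, len+1)
def coinsVariantIterative (row : List Int) : Int × (List (Int × Int)) :=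
  let table : PySem.Dict Int Int := PySem.Dict.empty
  let table := table.insert 0 0
  let table := table.insert 1 (PySem.List.pyGetD row (-1) 0)
  let table := table.insert 2 (PySem.List.pyGetD row (-1) 0 + PySem.List.pyGetD row (-2) 0)
  let table := table.insert 3 (max (max (table.getD 1 0 + PySem.List.pyGetD row (-3) 0)
      (table.getD 2 0)) (PySem.List.pyGetD row (-2) 0 + PySem.List.pyGetD row (-3) 0))
  let table := (PySem.List.pyRange 4 ((row.length : Int) + 1) 1).foldl
    (fun t i =>
      let resulti := max (max (t.getD (i-4) 0 + PySem.List.pyGetD row (1-i) 0 + PySem.List.pyGetD row (-i) 0)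
          (t.getD (i-2) 0 + PySem.List.pyGetD row (-i) 0)) (t.getD (i-1) 0)
      t.insert i resulti) table
  (table.getD (row.length : Int) 0, table.items)

-- ===== PORT B =====
-- Source B's while-loop over the mutable (stack, table) pair; fuel (first argument) is a totality
-- guard only: 2*len(row)+4 iterations always suffice (proved below), the Python loop has no bound.
def loopB (row : List Int) : Nat → List Int → PySem.Dict Int Int → PySem.Dict Int Int
  | 0, _, table => table
  | _+1, [], table => table                       -- while stack: — exit on empty stack
  | fuel+1, x :: rest, table =>
    let stack := x :: rest
    let i := PySem.List.pyGetD stack (-1) 0       -- i = stack[-1] (stack is nonempty here)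
    if table.contains i then
      loopB row fuel stack.dropLast table         -- stack.pop()
    else if table.contains (i-1) then
      let r := max (max (table.getD (i-4) 0 + PySem.List.pyGetD row (1-i) 0 + PySem.List.pyGetD row (-i) 0)
          (table.getD (i-2) 0 + PySem.List.pyGetD row (-i) 0)) (table.getD (i-1) 0)
      loopB row fuel stack.dropLast (table.insert i r)
    else
      loopB row fuel (stack ++ [i-1]) table       -- stack.append(i - 1)

def coinsVariantIterative_alt (row : List Int) : Int × (List (Int × Int)) :=
  let table : PySem.Dict Int Int := PySem.Dict.empty
  let table := table.insert 0 0
  let table := table.insert 1 (PySem.List.pyGetD row (-1) 0)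
  let table := table.insert 2 (PySem.List.pyGetD row (-1) 0 + PySem.List.pyGetD row (-2) 0)
  let table := table.insert 3 (max (max (table.getD 1 0 + PySem.List.pyGetD row (-3) 0)
      (table.getD 2 0)) (PySem.List.pyGetD row (-2) 0 + PySem.List.pyGetD row (-3) 0))
  let table := loopB row (2 * row.length + 4) [(row.length : Int)] table
  (table.getD (row.length : Int) 0, table.items)

-- ===== PRECONDITION & SPEC =====
-- A reads the last three elements of the list unconditionally, so it raises IndexError whenever the
-- list has fewer than three elements; exactly those inputs are excluded (B raises there too).
def Pre_coinsVariantIterative (row : List Int) : Prop := 3 ≤ row.length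
instance (row : List Int) : Decidable (Pre_coinsVariantIterative row) := by
  unfold Pre_coinsVariantIterative; infer_instance

def pvWitness_coinsVariantIterative : List Int := [1, 2, 3]

def Spec_coinsVariantIterative (row : List Int) (out : Int × (List (Int × Int))) : Prop := out = coinsVariantIterative_alt row
instance (row : List Int) (out : Int × (List (Int × Int))) : Decidable (Spec_coinsVariantIterative row out) := by unfold Spec_coinsVariantIterative; infer_instance

-- ===== CLAIM (what is proved, stated in full; the proofs are below) =====
def Claim_equal_coinsVariantIterative : Prop := ∀ (row : List Int), Dom_coinsVariantIterative row → Pre_coinsVariantIterative row → Spec_coinsVariantIterative row (coinsVariantIterative row)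

-- ===== LEMMAS AND PROOFS =====

-- the common value table[k]
def pvVal (row : List Int) : Nat → Int
  | 0 => 0
  | 1 => PySem.List.pyGetD row (-1) 0
  | 2 => PySem.List.pyGetD row (-1) 0 + PySem.List.pyGetD row (-2) 0
  | 3 => max (max (PySem.List.pyGetD row (-1) 0 + PySem.List.pyGetD row (-3) 0)
      (PySem.List.pyGetD row (-1) 0 + PySem.List.pyGetD row (-2) 0))
      (PySem.List.pyGetD row (-2) 0 + PySem.List.pyGetD row (-3) 0)
  | (k+4) => max (max (pvVal row k + PySem.List.pyGetD row (1-((k:Int)+4)) 0 + PySem.List.pyGetD row (-((k:Int)+4)) 0)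
      (pvVal row (k+2) + PySem.List.pyGetD row (-((k:Int)+4)) 0)) (pvVal row (k+3))

-- the table after filling keys 0..max j 3
def pvTbl (row : List Int) : Nat → PySem.Dict Int Int
  | 0 => ((((PySem.Dict.empty).insert 0 (pvVal row 0)).insert 1 (pvVal row 1)).insert 2 (pvVal row 2)).insert 3 (pvVal row 3)
  | 1 => pvTbl row 0
  | 2 => pvTbl row 0
  | 3 => pvTbl row 0
  | (k+4) => (pvTbl row (k+3)).insert ((k:Int)+4) (pvVal row (k+4))

lemma pvTbl_le_three (row : List Int) (j : Nat) (hj : j ≤ 3) : pvTbl row j = pvTbl row 0 := by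
  interval_cases j <;> rfl

lemma getD_pvTbl (row : List Int) : ∀ j k, k ≤ max j 3 →
    (pvTbl row j).getD (k : Int) 0 = pvVal row k := by
  intro j
  induction j using Nat.strong_induction_on with
  | _ j ih =>
    intro k hk
    match j with
    | 0 | 1 | 2 | 3 =>
      rw [pvTbl_le_three row _ (by omega)]
      have hk3 : k ≤ 3 := by omega
      interval_cases k <;>
        simp [pvTbl, pvVal, PySem.Dict.getD_insert]
    | (m+4) =>
      have hk' : k ≤ m + 4 := by omega
      rw [pvTbl, PySem.Dict.getD_insert]
      by_cases hkm : k = m + 4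
      · subst hkm
        simp
      · have hne : (k : Int) ≠ (m : Int) + 4 := by
          intro h; apply hkm; omega
        rw [if_neg hne]
        exact ih (m+3) (by omega) k (by omega)

lemma contains_pvTbl (row : List Int) : ∀ j (x : Int),
    (pvTbl row j).contains x = true ↔ 0 ≤ x ∧ x ≤ max j 3 := by
  intro j
  induction j using Nat.strong_induction_on with
  | _ j ih =>
    intro x
    match j with
    | 0 | 1 | 2 | 3 =>
      rw [pvTbl_le_three row _ (by omega)]
      show (pvTbl row 0).contains x = true ↔ _
      rw [pvTbl]
      simp only [PySem.Dict.contains_insert, PySem.Dict.contains_empty]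
      simp only [Bool.or_eq_true, beq_iff_eq]
      norm_num
      constructor
      · rintro (((h | h) | h) | h) <;> omega
      · intro h
        have : x = 0 ∨ x = 1 ∨ x = 2 ∨ x = 3 := by omega
        rcases this with h | h | h | h <;> simp [h]
    | (m+4) =>
      rw [pvTbl]
      rw [PySem.Dict.contains_insert]
      simp only [Bool.or_eq_true, beq_iff_eq]
      rw [ih (m+3) (by omega)]
      constructor
      · rintro (h | ⟨h1, h2⟩) <;> omega
      · intro ⟨h1, h2⟩
        by_cases hx : x = (m : Int) + 4
        · exact Or.inl hx
        · right; constructor <;> omega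

-- one step of the recurrence, applied to the filled table
lemma stepA_pvTbl (row : List Int) (m : Nat) (hm : 3 ≤ m) :
    (pvTbl row m).insert ((m : Int) + 1)
      (max (max ((pvTbl row m).getD (((m : Int) + 1) - 4) 0 + PySem.List.pyGetD row (1 - ((m : Int) + 1)) 0 + PySem.List.pyGetD row (-((m : Int) + 1)) 0)
        ((pvTbl row m).getD (((m : Int) + 1) - 2) 0 + PySem.List.pyGetD row (-((m : Int) + 1)) 0))
        ((pvTbl row m).getD (((m : Int) + 1) - 1) 0)) = pvTbl row (m + 1) := by
  obtain ⟨k, rfl⟩ : ∃ k, m = k + 3 := ⟨m - 3, by omega⟩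
  have h4 : ((k + 3 : Nat) : Int) + 1 - 4 = ((k : Nat) : Int) := by push_cast; ring
  have h2 : ((k + 3 : Nat) : Int) + 1 - 2 = ((k + 2 : Nat) : Int) := by push_cast; ring
  have h1 : ((k + 3 : Nat) : Int) + 1 - 1 = ((k + 3 : Nat) : Int) := by push_cast; ring
  rw [h4, h2, h1,
    getD_pvTbl row (k+3) k (by omega),
    getD_pvTbl row (k+3) (k+2) (by omega),
    getD_pvTbl row (k+3) (k+3) (by omega)]
  show _ = (pvTbl row (k+3)).insert ((k:Int)+4) (pvVal row (k+4))
  have hkey : ((k + 3 : Nat) : Int) + 1 = (k : Int) + 4 := by push_cast; ring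
  rw [hkey]
  congr 1

-- A's loop fills the table bottom-up
lemma loopA_pvTbl (row : List Int) : ∀ (m : Nat), 3 ≤ m →
    (PySem.List.pyRange 4 ((m : Int) + 1) 1).foldl
      (fun t i =>
        let resulti := max (max (t.getD (i-4) 0 + PySem.List.pyGetD row (1-i) 0 + PySem.List.pyGetD row (-i) 0)
            (t.getD (i-2) 0 + PySem.List.pyGetD row (-i) 0)) (t.getD (i-1) 0)
        t.insert i resulti) (pvTbl row 0) = pvTbl row m := by
  intro m hm
  induction m with
  | zero => omega
  | succ m ihm =>
    by_cases hm3 : 3 ≤ m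
    · have hrange : PySem.List.pyRange 4 (((m + 1 : Nat) : Int) + 1) 1
          = PySem.List.pyRange 4 ((m : Int) + 1) 1 ++ [(m : Int) + 1] := by
        have : (((m + 1 : Nat) : Int) + 1) = ((m : Int) + 1) + 1 := by push_cast; ring
        rw [this]
        exact PySem.List.pyRange_one_succ_right (by omega)
      rw [hrange, List.foldl_append, ihm hm3]
      simp only [List.foldl]
      exact stepA_pvTbl row m hm3
    · have : m = 2 := by omega
      subst this
      have : PySem.List.pyRange 4 (((2 + 1 : Nat) : Int) + 1) 1 = [] := by
        simp [PySem.List.pyRange]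
      rw [this]
      simp only [List.foldl]
      exact (pvTbl_le_three row 3 (by omega)).symm

-- B's stack, from the initial [n] after k pushes: [n, n-1, …, n-k]
def pvSeg (n : Nat) : Nat → List Int
  | 0 => [(n : Int)]
  | k+1 => pvSeg n k ++ [((n - (k+1) : Nat) : Int)]

lemma pvSeg_ne_nil (n k : Nat) : pvSeg n k ≠ [] := by
  cases k <;> simp [pvSeg]

lemma last_pvSeg (n k : Nat) : PySem.List.pyGetD (pvSeg n k) (-1) 0 = ((n - k : Nat) : Int) := by
  cases k with
  | zero => simp [pvSeg, PySem.List.pyGetD, PySem.List.pyGet?, PySem.List.pyIdx?]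
  | succ k =>
    rw [pvSeg]
    simp [PySem.List.pyGetD, PySem.List.pyGet?, PySem.List.pyIdx?]

lemma dropLast_pvSeg (n : Nat) : ∀ k, (pvSeg n k).dropLast = if k = 0 then [] else pvSeg n (k-1) := by
  intro k
  cases k with
  | zero => simp [pvSeg]
  | succ k => simp [pvSeg]

-- B's loop, run on a descending stack over the filled table, completes the table:
-- top = n-k is the first index not yet in the table (j+1 ≤ n-k), and the fuel suffices
lemma loopB_pvSeg (row : List Int) (n : Nat) : ∀ fuel j k, 3 ≤ j → j ≤ n → j + 1 ≤ n - k →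
    (n - k - (j + 1)) + (n - j) ≤ fuel →
    loopB row fuel (pvSeg n k) (pvTbl row j) = pvTbl row n := by
  intro fuel
  induction fuel with
  | zero => intro j k _ hjn hk hfuel; omega
  | succ fuel ih =>
    intro j k hj hjn hk hfuel
    obtain ⟨x, rest, hs⟩ : ∃ x rest, pvSeg n k = x :: rest := by
      cases hseg : pvSeg n k with
      | nil => exact absurd hseg (pvSeg_ne_nil n k)
      | cons x rest => exact ⟨x, rest, rfl⟩
    rw [hs, loopB]
    rw [← hs, last_pvSeg]
    have hcont : (pvTbl row j).contains ((n - k : Nat) : Int) = false := by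
      rw [← Bool.not_eq_true]
      intro hco
      have := (contains_pvTbl row j _).mp hco
      omega
    rw [hcont]
    simp only [Bool.false_eq_true, if_false]
    by_cases htop : n - k = j + 1
    · -- top is exactly the next index: fill it and pop
      have hc1 : ((n - k : Nat) : Int) - 1 = (j : Int) := by rw [htop]; push_cast; ring
      have hcont1 : (pvTbl row j).contains (((n - k : Nat) : Int) - 1) = true := by
        rw [hc1, contains_pvTbl]
        constructor <;> omega
      rw [hcont1]
      simp only [if_true]
      have hkey : ((n - k : Nat) : Int) = (j : Int) + 1 := by rw [htop]; push_cast; ring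
      rw [hkey, stepA_pvTbl row j hj, dropLast_pvSeg]
      by_cases hk0 : k = 0
      · -- the stack becomes empty: n - 0 = j + 1, the table is complete
        rw [if_pos hk0]
        have : j + 1 = n := by omega
        rw [this]
        cases fuel <;> rfl
      · rw [if_neg hk0]
        obtain ⟨k', rfl⟩ : ∃ k', k = k' + 1 := ⟨k - 1, by omega⟩
        have hk' : k' + 1 - 1 = k' := by omega
        rw [hk']
        exact ih (j+1) k' (by omega) (by omega) (by omega) (by omega)
    · -- top's predecessor is still missing: push it
      have hcont1 : (pvTbl row j).contains (((n - k : Nat) : Int) - 1) = false := by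
        rw [← Bool.not_eq_true]
        intro hco
        have := (contains_pvTbl row j _).mp hco
        omega
      rw [hcont1]
      simp only [Bool.false_eq_true, if_false]
      have hpush : (pvSeg n k) ++ [((n - k : Nat) : Int) - 1] = pvSeg n (k+1) := by
        rw [pvSeg]
        have : ((n - (k+1) : Nat) : Int) = ((n - k : Nat) : Int) - 1 := by omega
        rw [this]
      rw [hs] at hpush ⊢
      rw [hpush]
      exact ih j (k+1) hj hjn (by omega) (by omega)

-- the base table both ports build is pvTbl row 0
lemma base_eq_pvTbl (row : List Int) :
    ((((PySem.Dict.empty : PySem.Dict Int Int).insert 0 0).insert 1 (PySem.List.pyGetD row (-1) 0)).insert 2 (PySem.List.pyGetD row (-1) 0 + PySem.List.pyGetD row (-2) 0)).insert 3 (max (max (((((PySem.Dict.empty : PySem.Dict Int Int).insert 0 0).insert 1 (PySem.List.pyGetD row (-1) 0)).insert 2 (PySem.List.pyGetD row (-1) 0 + PySem.List.pyGetD row (-2) 0)).getD 1 0 + PySem.List.pyGetD row (-3) 0) (((((PySem.Dict.empty : PySem.Dict Int Int).insert 0 0).insert 1 (PySem.List.pyGetD row (-1) 0)).insert 2 (PySem.List.pyGetD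 row (-1) 0 + PySem.List.pyGetD row (-2) 0)).getD 2 0)) (PySem.List.pyGetD row (-2) 0 + PySem.List.pyGetD row (-3) 0)) = pvTbl row 0 := by
  rw [pvTbl]
  simp [PySem.Dict.getD_insert, pvVal]

-- ===== VERDICT (by name: the statement is the Claim_ definition above) =====
theorem coinsVariantIterative_spec : Claim_equal_coinsVariantIterative := by
  intro row _ hpre
  unfold Spec_coinsVariantIterative coinsVariantIterative coinsVariantIterative_alt
  have hlen : 3 ≤ row.length := hpre
  simp only [base_eq_pvTbl row]
  rw [loopA_pvTbl row row.length hlen]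
  have hB : loopB row (2 * row.length + 4) [(row.length : Int)] (pvTbl row 0) = pvTbl row row.length := by
    by_cases h4 : 4 ≤ row.length
    · have : [(row.length : Int)] = pvSeg row.length 0 := rfl
      rw [this, ← pvTbl_le_three row 3 (by omega)]
      exact loopB_pvSeg row row.length (2 * row.length + 4) 3 0 (by omega) (by omega) (by omega) (by omega)
    · -- len(row) = 3: the top of the stack is already in the table, one pop and the loop exits
      have h3 : row.length = 3 := by omega
      rw [h3]
      show loopB row 10 [(3 : Int)] (pvTbl row 0) = pvTbl row 3
      rw [loopB]
      have hc : (pvTbl row 0).contains ((3:Nat) : Int) = true := by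
        rw [contains_pvTbl]; constructor <;> omega
      norm_num at hc ⊢
      rw [PySem.List.pyGetD]
      simp [PySem.List.pyGet?, PySem.List.pyIdx?, hc, pvTbl_le_three row 3 (by omega)]
      rfl
    
  rw [hB]
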